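-- pv_equiv track=rewrite | github.com/qn06142/coding-python | divsubseq.py | meet_in_the_middle
-- ===== SOURCE A (Python) =====
-- def meet_in_the_middle(n, values):
--     total_value = sum(values)
--     target_value = total_value // 2
--     mid = n // 2
--
--     subset_values = {}
--     for i in range(1 << mid):
--         subset_value = sum(values[j] for j in range(mid) if (i & (1 << j)))
--         subset_values[subset_value] = subset_values.get(subset_value, 0) + 1
--
--     max_value = 0
--     for i in range(1 << (n - mid)):
--         subset_value = sum(values[mid + j] for j in range(n - mid) if (i & (1 << j)))
--         if target_value - subset_value in subset_values:
--             max_value = max(max_value, subset_value)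
--
--     return total_value - 2 * max_value
-- ===== SOURCE B (Python) =====
-- def meet_in_the_middle(n, values):
--     total_value = sum(values)
--     target_value = total_value // 2
--     mid = n // 2
--
--     def subset_sums(vals):
--         sums = {0}
--         for v in vals:
--             sums |= {s + v for s in sums}
--         return sums
--
--     first = subset_sums(values[j] for j in range(mid))
--     second = subset_sums(values[mid + j] for j in range(n - mid))
--
--     max_value = 0
--     for t in second:
--         if target_value - t in first and t > max_value:
--             max_value = t
--     return total_value - 2 * max_value
-- ===== Notes on version B (the rewrite author's own statement) =====
-- stated objective: alternative
-- what changed: Replaces the per-subset bitmask re-summation of both halves with an incremental subset-sum DP that builds each half's set of achievable sums by one set union per element, deduplicating equal sums as it goes.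
import Mathlib
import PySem

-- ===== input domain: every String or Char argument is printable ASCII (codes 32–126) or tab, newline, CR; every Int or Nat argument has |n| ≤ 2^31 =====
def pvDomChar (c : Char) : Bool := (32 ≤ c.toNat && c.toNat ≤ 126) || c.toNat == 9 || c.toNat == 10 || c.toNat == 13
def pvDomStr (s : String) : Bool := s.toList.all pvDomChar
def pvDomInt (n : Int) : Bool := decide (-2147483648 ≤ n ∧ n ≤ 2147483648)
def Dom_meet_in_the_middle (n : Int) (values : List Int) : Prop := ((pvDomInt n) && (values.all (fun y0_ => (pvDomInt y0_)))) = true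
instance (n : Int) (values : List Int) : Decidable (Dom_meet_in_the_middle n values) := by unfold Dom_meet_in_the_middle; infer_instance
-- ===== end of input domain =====

-- B replaces A's per-subset bitmask re-summation of each half by an incremental subset-sum DP
-- (one set-union per element), which deduplicates equal sums as it goes.

-- ===== PORT A =====
-- 'sum(values[j] for j in range(mid) if (i & (1 << j)))': range(k) over a nonnegative bound is
-- ported as List.range k over Nat and 'i & (1 << j) != 0' as Nat.testBit i j (exact for k ≥ 0;
-- Python raises ValueError on '1 << mid' for negative mid, excluded by Pre_). 'values[idx]'
-- raises IndexError out of range; ported total as pyGetD _ _ 0, exact under Pre_ (every accessed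
-- index is in range there).
def mitmMaskSum (values : List Int) (off : Int) (k : Nat) (i : Nat) : Int :=
  (((List.range k).filter (fun j => i.testBit j)).map
    (fun (j : Nat) => PySem.List.pyGetD values (off + (j : Int)) 0)).sum

def meet_in_the_middle (n : Int) (values : List Int) : Int :=
  let total_value := values.sum
  let target_value := PySem.Int.floordiv total_value 2
  let mid := PySem.Int.floordiv n 2
  let subset_values := (List.range (2 ^ mid.toNat)).foldl
    (fun d i =>
      let subset_value := mitmMaskSum values 0 mid.toNat i
      d.insert subset_value (d.getD subset_value 0 + 1))
    (PySem.Dict.empty : PySem.Dict Int Int)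
  let max_value := (List.range (2 ^ (n - mid).toNat)).foldl
    (fun m i =>
      let subset_value := mitmMaskSum values mid (n - mid).toNat i
      if subset_values.contains (target_value - subset_value) then max m subset_value else m)
    (0 : Int)
  total_value - 2 * max_value

-- ===== PORT B =====
def mitmSubsetSums (vals : List Int) : PySem.Set Int :=
  vals.foldl (fun sums v => PySem.Set.union sums (sums.map (· + v))) (PySem.Set.ofList [0])

-- the generator arguments 'values[j] for j in range(mid)' / 'values[mid+j] for j in range(n-mid)'
-- are ported as maps over pyRange; 'values[idx]' raises IndexError out of range, ported total as
-- pyGetD _ _ 0 (exact under Pre_, where every accessed index is in range)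
def meet_in_the_middle_alt (n : Int) (values : List Int) : Int :=
  let total_value := values.sum
  let target_value := PySem.Int.floordiv total_value 2
  let mid := PySem.Int.floordiv n 2
  let first := mitmSubsetSums
    ((PySem.List.pyRange 0 mid 1).map (fun j => PySem.List.pyGetD values j 0))
  let second := mitmSubsetSums
    ((PySem.List.pyRange 0 (n - mid) 1).map (fun j => PySem.List.pyGetD values (mid + j) 0))
  -- running max over the set 'second': the result is order-independent
  let max_value := second.foldl
    (fun m t => if PySem.Set.contains first (target_value - t) && decide (m < t) then t else m)
    (0 : Int)
  total_value - 2 * max_value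

-- ===== PRECONDITION & SPEC =====
-- A raises ValueError for n < 0 (left shift by a negative amount) and IndexError for
-- n > len(values); Pre_ admits exactly the remaining inputs.
def Pre_meet_in_the_middle (n : Int) (values : List Int) : Prop :=
  0 ≤ n ∧ n ≤ (values.length : Int)
instance (n : Int) (values : List Int) : Decidable (Pre_meet_in_the_middle n values) := by
  unfold Pre_meet_in_the_middle; infer_instance

def pvWitness_meet_in_the_middle : Int × List Int := (3, [5, 3, 7])

def Spec_meet_in_the_middle (n : Int) (values : List Int) (out : Int) : Prop :=
  out = meet_in_the_middle_alt n values
instance (n : Int) (values : List Int) (out : Int) : Decidable (Spec_meet_in_the_middle n values out) := by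
  unfold Spec_meet_in_the_middle; infer_instance

-- ===== CLAIM (what is proved, stated in full; the proofs are below) =====
def Claim_equal_meet_in_the_middle : Prop := ∀ (n : Int) (values : List Int), Dom_meet_in_the_middle n values → Pre_meet_in_the_middle n values → Spec_meet_in_the_middle n values (meet_in_the_middle n values)

-- ===== LEMMAS AND PROOFS =====

-- canonical 'sum of the elements of ys selected by the bits of i'
def listMaskSum (ys : List Int) (i : Nat) : Int :=
  (((List.range ys.length).filter (fun j => i.testBit j)).map (fun j => ys.getD j 0)).sum

-- the dict A's first loop builds (proof-side name for the port's fold)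
def mitmDict (values : List Int) (M : Nat) : PySem.Dict Int Int :=
  (List.range (2 ^ M)).foldl
    (fun d i => d.insert (mitmMaskSum values 0 M i) (d.getD (mitmMaskSum values 0 M i) 0 + 1))
    PySem.Dict.empty

theorem listMaskSum_concat (ys : List Int) (x : Int) (i : Nat) :
    listMaskSum (ys ++ [x]) i
      = listMaskSum ys (i % 2 ^ ys.length) + (if i.testBit ys.length then x else 0) := by
  unfold listMaskSum
  have hlen : (ys ++ [x]).length = ys.length + 1 := by simp
  rw [hlen, List.range_succ, List.filter_append, List.map_append, List.sum_append]
  congr 1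
  · have hf : (List.range ys.length).filter (fun j => (i % 2 ^ ys.length).testBit j)
        = (List.range ys.length).filter (fun j => i.testBit j) := by
      apply List.filter_congr
      intro j hj
      rw [Nat.testBit_mod_two_pow]
      simp [List.mem_range.mp hj]
    rw [hf]
    apply congrArg
    apply List.map_congr_left
    intro j hj
    have hjlt : j < ys.length := List.mem_range.mp (List.mem_of_mem_filter hj)
    rw [List.getD_eq_getElem?_getD, List.getD_eq_getElem?_getD, List.getElem?_append_left hjlt]
  · by_cases hb : i.testBit ys.length
    · simp [hb, List.getD_eq_getElem?_getD]
    · simp [hb]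

theorem mem_mitmSubsetSums (ys : List Int) (t : Int) :
    t ∈ mitmSubsetSums ys ↔ ∃ i, i < 2 ^ ys.length ∧ listMaskSum ys i = t := by
  induction ys using List.reverseRecOn generalizing t with
  | nil =>
    simp only [mitmSubsetSums, List.foldl_nil, listMaskSum, List.length_nil, List.range_zero,
      List.filter_nil, List.map_nil, List.sum_nil, pow_zero]
    rw [PySem.Set.mem_ofList]
    constructor
    · intro h
      refine ⟨0, Nat.one_pos, ?_⟩
      simpa using (List.mem_singleton.mp h).symm
    · rintro ⟨i, _, h⟩
      simp [← h]
  | append_singleton ys x ih =>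
    have hfold : mitmSubsetSums (ys ++ [x])
        = PySem.Set.union (mitmSubsetSums ys) ((mitmSubsetSums ys).map (· + x)) := by
      simp [mitmSubsetSums, List.foldl_append]
    have hpos : 0 < 2 ^ ys.length := Nat.two_pow_pos _
    have hpow : 2 ^ (ys ++ [x]).length = 2 ^ ys.length * 2 := by
      simp [List.length_append, pow_succ]
    rw [hfold, PySem.Set.mem_union]
    constructor
    · rintro (h | h)
      · obtain ⟨i, hi, hs⟩ := (ih t).mp h
        refine ⟨i, by omega, ?_⟩
        rw [listMaskSum_concat]
        have hbit : i.testBit ys.length = false := Nat.testBit_lt_two_pow hi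
        rw [Nat.mod_eq_of_lt hi, hbit, hs]
        simp
      · rw [List.mem_map] at h
        obtain ⟨s, hsmem, rfl⟩ := h
        obtain ⟨i, hi, hs⟩ := (ih s).mp hsmem
        refine ⟨i + 2 ^ ys.length, by omega, ?_⟩
        rw [listMaskSum_concat]
        have hmod : (i + 2 ^ ys.length) % 2 ^ ys.length = i := by
          rw [Nat.add_mod_right, Nat.mod_eq_of_lt hi]
        have hbit : (i + 2 ^ ys.length).testBit ys.length = true := by
          rw [Nat.add_comm, Nat.testBit_two_pow_add_eq, Nat.testBit_lt_two_pow hi]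
          rfl
        rw [hmod, hbit, hs]
        simp
    · rintro ⟨i, hi, rfl⟩
      rw [listMaskSum_concat]
      have hmlt : i % 2 ^ ys.length < 2 ^ ys.length := Nat.mod_lt _ hpos
      by_cases hb : i.testBit ys.length
      · right
        rw [List.mem_map]
        exact ⟨listMaskSum ys (i % 2 ^ ys.length), (ih _).mpr ⟨_, hmlt, rfl⟩, by simp [hb]⟩
      · left
        refine (ih _).mpr ⟨i % 2 ^ ys.length, hmlt, ?_⟩
        simp [hb]

theorem mitmMaskSum_eq (values : List Int) (m k : Nat) (hk : m + k ≤ values.length) (i : Nat) :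
    mitmMaskSum values (m : Int) k i = listMaskSum ((values.drop m).take k) i := by
  unfold mitmMaskSum listMaskSum
  have hlen : ((values.drop m).take k).length = k := by
    rw [List.length_take, List.length_drop]; omega
  rw [hlen]
  apply congrArg
  apply List.map_congr_left
  intro j hj
  have hjlt : j < k := List.mem_range.mp (List.mem_of_mem_filter hj)
  have hidx : m + j < values.length := by omega
  have hcast : (m : Int) + (j : Int) = ((m + j : Nat) : Int) := by push_cast; ring
  rw [hcast, PySem.List.pyGetD_natCast]
  simp [List.getD_eq_getElem?_getD, List.getElem?_take_of_lt hjlt, List.getElem?_drop]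

theorem mitmDict_contains (values : List Int) (M : Nat) (t : Int) :
    (mitmDict values M).contains t = true
      ↔ ∃ i, i < 2 ^ M ∧ mitmMaskSum values 0 M i = t := by
  unfold mitmDict
  rw [PySem.Dict.contains_iff_mem_keys,
    PySem.Dict.keys_foldl_insert_key (key := fun i => mitmMaskSum values 0 M i)
      (f := fun d i => d.getD (mitmMaskSum values 0 M i) 0 + 1),
    PySem.Dict.keys_empty, PySem.Set.update_nil_left, PySem.Set.mem_ofList]
  constructor
  · intro h
    obtain ⟨i, hi, hit⟩ := List.mem_map.mp h
    exact ⟨i, List.mem_range.mp hi, hit⟩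
  · rintro ⟨i, hi, hit⟩
    exact List.mem_map.mpr ⟨i, List.mem_range.mpr hi, hit⟩

theorem loopA_eq (g : Nat → Int) (p : Int → Bool) (N : Nat) :
    (List.range N).foldl (fun m i => if p (g i) then max m (g i) else m) (0 : Int)
      = (((List.range N).map g).filter p).foldl max (0 : Int) := by
  rw [← PySem.List.foldl_if_eq_foldl_filter, List.foldl_map]

theorem loopB_eq (q : Int → Bool) (L : List Int) :
    L.foldl (fun m t => if q t && decide (m < t) then t else m) (0 : Int)
      = (L.filter q).foldl max (0 : Int) := by
  rw [← PySem.List.foldl_if_eq_foldl_filter]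
  apply PySem.List.foldl_congr_mem
  intro acc x _
  by_cases h1 : q x <;> by_cases h2 : acc < x <;>
    simp [h1, h2, max_def] <;> omega

theorem map_pyGetD_range_eq (values : List Int) (off m : Nat) (h : off + m ≤ values.length) :
    (List.range m).map (fun (k : Nat) => PySem.List.pyGetD values ((off : Int) + (k : Int)) 0)
      = (values.drop off).take m := by
  apply List.ext_getElem
  · simp; omega
  · intro i h1 h2
    simp only [List.getElem_map, List.getElem_range]
    have hidx : off + i < values.length := by
      simp only [List.length_map, List.length_range] at h1; omega
    have hcast : (off : Int) + (i : Int) = ((off + i : Nat) : Int) := by push_cast; ring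
    rw [hcast, PySem.List.pyGetD_natCast, List.getElem_take, List.getElem_drop]
    simp [List.getElem?_eq_getElem hidx]

theorem foldl_max_eq_of_mem_iff (L1 L2 : List Int) (a : Int)
    (h : ∀ t, t ∈ L1 ↔ t ∈ L2) : L1.foldl max a = L2.foldl max a := by
  have key : ∀ (P Q : List Int), (∀ t, t ∈ P → t ∈ Q) → P.foldl max a ≤ Q.foldl max a := by
    intro P Q hPQ
    rcases PySem.List.foldl_max_mem P a with h1 | h1
    · rw [h1]; exact (PySem.List.le_foldl_max Q a).1
    · exact (PySem.List.le_foldl_max Q a).2 _ (hPQ _ h1)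
  exact le_antisymm (key L1 L2 fun t => (h t).mp) (key L2 L1 fun t => (h t).mpr)

-- ===== VERDICT (by name: the statement is the Claim_ definition above) =====
theorem meet_in_the_middle_spec : Claim_equal_meet_in_the_middle := by
  intro n values _ hpre
  obtain ⟨h0, hlen⟩ := hpre
  unfold Spec_meet_in_the_middle
  have hfd : PySem.Int.floordiv n 2 = n / 2 := PySem.Int.floordiv_eq_ediv_of_pos (by norm_num)
  have hm0 : 0 ≤ PySem.Int.floordiv n 2 := by rw [hfd]; omega
  have hmn : PySem.Int.floordiv n 2 ≤ n := by rw [hfd]; omega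
  set total := values.sum with htotal
  set target := PySem.Int.floordiv total 2 with htarget
  set mid := PySem.Int.floordiv n 2 with hmid
  set M := mid.toNat with hM
  set K := (n - mid).toNat with hK
  have hMcast : (M : Int) = mid := Int.toNat_of_nonneg hm0
  have hKcast : (K : Int) = n - mid := Int.toNat_of_nonneg (by omega)
  have hMK : M + K ≤ values.length := by omega
  set fh := values.take M with hfh
  set sh := (values.drop M).take K with hsh
  have hfhlen : fh.length = M := by rw [hfh, List.length_take]; omega
  have hshlen : sh.length = K := by rw [hsh, List.length_take, List.length_drop]; omega
  have hgen1 : (PySem.List.pyRange 0 mid 1).map (fun j => PySem.List.pyGetD values j 0) = fh := by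
    have h1 := map_pyGetD_range_eq values 0 M (by omega)
    rw [PySem.List.pyRange_one, List.map_map]
    simpa [Function.comp_def, hfh, ← hM] using h1
  have hgen2 : (PySem.List.pyRange 0 (n - mid) 1).map
      (fun j => PySem.List.pyGetD values (mid + j) 0) = sh := by
    have h2 := map_pyGetD_range_eq values M K hMK
    rw [hMcast] at h2
    rw [PySem.List.pyRange_one, List.map_map]
    simpa [Function.comp_def, hsh, ← hK] using h2
  have hmask1 : ∀ i : Nat, mitmMaskSum values 0 M i = listMaskSum fh i := by
    intro i
    have h := mitmMaskSum_eq values 0 M (by omega) i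
    simpa [hfh] using h
  have hmask2 : ∀ i : Nat, mitmMaskSum values mid K i = listMaskSum sh i := by
    intro i
    rw [hsh, ← hMcast]
    exact mitmMaskSum_eq values M K hMK i
  have hA : meet_in_the_middle n values
      = total - 2 * ((List.range (2 ^ K)).foldl
          (fun m i => if (mitmDict values M).contains (target - mitmMaskSum values mid K i)
            then max m (mitmMaskSum values mid K i) else m) (0 : Int)) := rfl
  have hB : meet_in_the_middle_alt n values
      = total - 2 * ((mitmSubsetSums sh).foldl
          (fun m t => if PySem.Set.contains (mitmSubsetSums fh) (target - t) && decide (m < t)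
            then t else m) (0 : Int)) := by
    simp only [meet_in_the_middle_alt]
    rw [hgen1, hgen2]
  rw [hA, hB]
  congr 1
  congr 1
  refine Eq.trans (loopA_eq (fun i => mitmMaskSum values mid K i)
    (fun t => (mitmDict values M).contains (target - t)) (2 ^ K)) ?_
  refine Eq.trans ?_
    (loopB_eq (fun t => PySem.Set.contains (mitmSubsetSums fh) (target - t))
      (mitmSubsetSums sh)).symm
  apply foldl_max_eq_of_mem_iff
  intro t
  rw [List.mem_filter, List.mem_filter]
  have hmem : t ∈ (List.range (2 ^ K)).map (fun i => mitmMaskSum values mid K i)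
      ↔ t ∈ mitmSubsetSums sh := by
    rw [mem_mitmSubsetSums, hshlen]
    constructor
    · intro h
      obtain ⟨i, hi, hit⟩ := List.mem_map.mp h
      exact ⟨i, List.mem_range.mp hi, by rw [← hmask2 i]; exact hit⟩
    · rintro ⟨i, hi, hit⟩
      exact List.mem_map.mpr ⟨i, List.mem_range.mpr hi, by rw [hmask2 i]; exact hit⟩
  have hpq : (mitmDict values M).contains (target - t)
      = PySem.Set.contains (mitmSubsetSums fh) (target - t) := by
    rw [Bool.eq_iff_iff, mitmDict_contains, PySem.Set.contains_iff,
      mem_mitmSubsetSums, hfhlen]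
    simp only [hmask1]
  rw [hmem, hpq]
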